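-- pv_equiv track=rewrite | github.com/Juules32/alpos-exam | original_problem/bennysbiggestband/submissions/wrong_answer/non_balancing.py | dfs
-- ===== SOURCE A (Python) =====
-- def dfs(curr, t, graph, seen, path):
--     if curr == t:
--         return path
--
--     seen.add(curr)
--     for k, v in graph[curr].items():
--         if k not in seen and v > 0:
--             limit = min(path[0], v)
--             path[1].append(k)
--             p = dfs(k, t, graph, seen, (limit, path[1]))
--             if p:
--                 return p
--             path[1].pop()
--
--     return None
-- ===== SOURCE B (Python) =====
-- def dfs(curr, t, graph, seen, path):
--     # Iterative DFS with an explicit frame stack instead of recursion.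
--     if curr == t:
--         return path
--     pl = path[1]
--     seen.add(curr)
--     stack = [(iter(graph[curr].items()), path[0])]
--     while stack:
--         it, lim = stack[-1]
--         step = next(it, None)
--         if step is None:
--             stack.pop()
--             if stack:
--                 pl.pop()
--             continue
--         k, v = step
--         if k in seen or v <= 0:
--             continue
--         nl = min(lim, v)
--         pl.append(k)
--         if k == t:
--             return (nl, pl)
--         seen.add(k)
--         stack.append((iter(graph[k].items()), nl))
--     return None
-- ===== Notes on version B (the rewrite author's own statement) =====
-- stated objective: alternative
-- what changed: The recursive backtracking DFS is replaced by an iterative DFS over an explicit stack of (neighbor-iterator, limit) frames, with the same seen-set growth, path append/pop side effects and dict-iteration order.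
-- outside the precondition, e.g. on dfs('a', 'z', {'a': {'x': 0}, 'c': {'d': 1}}, set(), (5, [])): A returns None, B returns None
import Mathlib
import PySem

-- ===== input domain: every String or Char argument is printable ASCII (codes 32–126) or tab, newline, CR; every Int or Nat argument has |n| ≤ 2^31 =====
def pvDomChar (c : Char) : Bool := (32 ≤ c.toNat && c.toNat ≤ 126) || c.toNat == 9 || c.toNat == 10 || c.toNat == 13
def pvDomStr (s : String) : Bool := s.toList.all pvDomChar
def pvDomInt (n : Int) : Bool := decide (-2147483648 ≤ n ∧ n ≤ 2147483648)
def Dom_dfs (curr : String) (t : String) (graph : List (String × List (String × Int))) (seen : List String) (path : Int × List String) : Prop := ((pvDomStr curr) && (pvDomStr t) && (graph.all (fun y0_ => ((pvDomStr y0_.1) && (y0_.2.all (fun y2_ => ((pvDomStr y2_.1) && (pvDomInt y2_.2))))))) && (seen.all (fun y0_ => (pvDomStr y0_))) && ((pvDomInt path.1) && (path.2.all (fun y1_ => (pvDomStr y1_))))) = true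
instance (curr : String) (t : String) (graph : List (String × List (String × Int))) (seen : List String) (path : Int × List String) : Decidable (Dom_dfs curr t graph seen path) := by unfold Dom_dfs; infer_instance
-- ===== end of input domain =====

-- B replaces the recursive backtracking DFS by an iterative DFS over an explicit stack of
-- (remaining-neighbors, limit) frames (objective: alternative; equivalence is about the return value;
-- the seen/path mutations of A are reproduced by B as well, but only the return value is proved here).

-- ===== PORT A =====
-- A's recursion, totalized with a fuel counter that decreases once per recursive call
-- (fuel graph.length+3 is proved sufficient under Pre_); `none` = fuel exhausted or KeyError
-- (graph[curr] missing), both excluded by Pre_. The result carries the updated seen set,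
-- mirroring Python's in-place mutation of `seen`.
mutual
def dfsGo (t : String) (graph : List (String × List (String × Int))) :
    Nat → String → List String → Int × List String →
    Option (Option (Int × List String) × List String)
  | 0, _, _, _ => none
  | f + 1, curr, seen, path =>
    if curr = t then some (some path, seen)
    else
      match List.lookup curr graph with       -- graph[curr]; none = KeyError
      | none => none
      | some adj => tryGo t graph f adj (PySem.Set.add seen curr) path
termination_by f _ _ _ => (f, 0)

def tryGo (t : String) (graph : List (String × List (String × Int))) :
    Nat → List (String × Int) → List String → Int × List String →
    Option (Option (Int × List String) × List String)
  | _, [], seen, _ => some (none, seen)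
  | f, (k, v) :: rest, seen, path =>
    if seen.contains k = false ∧ 0 < v then
      match dfsGo t graph f k seen (min path.1 v, path.2 ++ [k]) with
      | none => none
      | some (some p, s') => some (some p, s')
      | some (none, s') => tryGo t graph f rest s' path   -- path[1].pop(): path restored
    else tryGo t graph f rest seen path
termination_by f rest _ _ => (f, rest.length + 1)
end

def dfs (curr : String) (t : String) (graph : List (String × List (String × Int))) (seen : List String) (path : Int × List String) : Option (Int × List String) :=
  match dfsGo t graph (graph.length + 3) curr seen path with
  | some (r, _) => r
  | none => none

-- ===== PORT B =====
-- B's explicit-stack loop, totalized with a fuel counter that decreases once per frame entry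
-- (fuel 2*graph.length+2 is proved sufficient under Pre_); `some none` = stack emptied (return None),
-- `some (some r)` = target found, `none` = fuel exhausted or KeyError (excluded by Pre_).
mutual
def runB (t : String) (graph : List (String × List (String × Int))) :
    Nat → List (List (String × Int) × Int) → List String → List String →
    Option (Option (Int × List String))
  | _, [], _, _ => some none                               -- while stack: exhausted → return None
  | 0, _ :: _, _, _ => none
  | f + 1, (rest, lim) :: stk, seen, pl => runFrameB t graph f rest lim stk seen pl
termination_by f _ _ _ => (f, 0)

def runFrameB (t : String) (graph : List (String × List (String × Int))) :
    Nat → List (String × Int) → Int → List (List (String × Int) × Int) → List String → List String →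
    Option (Option (Int × List String))
  | f, [], _, stk, seen, pl => runB t graph f stk seen pl.dropLast   -- iterator done: pop frame, pl.pop()
  | f, (k, v) :: rest, lim, stk, seen, pl =>
    if seen.contains k ∨ v ≤ 0 then runFrameB t graph f rest lim stk seen pl
    else
      let nl := min lim v
      let pl' := pl ++ [k]
      if k = t then some (some (nl, pl'))
      else
        match List.lookup k graph with                     -- graph[k]; none = KeyError
        | none => none
        | some adjK => runB t graph f ((adjK, nl) :: (rest, lim) :: stk) (PySem.Set.add seen k) pl'
termination_by f rest _ _ _ _ => (f, rest.length + 1)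
end

def dfs_alt (curr : String) (t : String) (graph : List (String × List (String × Int))) (seen : List String) (path : Int × List String) : Option (Int × List String) :=
  if curr = t then some path
  else
    match List.lookup curr graph with
    | none => none
    | some adj =>
      match runB t graph (2 * graph.length + 2) [(adj, path.1)] (PySem.Set.add seen curr) path.2 with
      | some r => r
      | none => none

-- ===== PRECONDITION & SPEC =====
-- Pre_ excludes the inputs where the traversal raises KeyError (a visited node missing from graph).
-- It over-approximates: it requires every positive-capacity neighbour listed anywhere in graph to be
-- the target, already seen, or a graph key, even if the traversal never reaches it — on such excluded
-- inputs A can still return (see claim.json "cites"); this keeps Pre_ closed-form.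
def Pre_dfs (curr : String) (t : String) (graph : List (String × List (String × Int))) (seen : List String) (path : Int × List String) : Prop :=
  curr = t ∨
    (curr ∈ graph.map Prod.fst ∧
      ∀ p ∈ graph, ∀ q ∈ p.2, 0 < q.2 → q.1 ∈ seen ∨ q.1 = t ∨ q.1 ∈ graph.map Prod.fst)
instance (curr : String) (t : String) (graph : List (String × List (String × Int))) (seen : List String) (path : Int × List String) : Decidable (Pre_dfs curr t graph seen path) := by unfold Pre_dfs; infer_instance

def pvWitness_dfs : String × String × (List (String × List (String × Int))) × List String × (Int × List String) :=
  ("a", "c", [("a", [("b", 2)]), ("b", [("c", 5)])], [], (7, []))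

def Spec_dfs (curr : String) (t : String) (graph : List (String × List (String × Int))) (seen : List String) (path : Int × List String) (out : Option (Int × List String)) : Prop := out = dfs_alt curr t graph seen path
instance (curr : String) (t : String) (graph : List (String × List (String × Int))) (seen : List String) (path : Int × List String) (out : Option (Int × List String)) : Decidable (Spec_dfs curr t graph seen path out) := by unfold Spec_dfs; infer_instance

-- ===== CLAIM (what is proved, stated in full; the proofs are below) =====
def Claim_equal_dfs : Prop := ∀ (curr : String) (t : String) (graph : List (String × List (String × Int))) (seen : List String) (path : Int × List String), Dom_dfs curr t graph seen path → Pre_dfs curr t graph seen path → Spec_dfs curr t graph seen path (dfs curr t graph seen path)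

-- ===== LEMMAS AND PROOFS =====

-- abbreviations used only by the proofs
def pvKeys (graph : List (String × List (String × Int))) : List String := graph.map Prod.fst

-- every positive-capacity edge target in `rest` is already seen, the target, or a key
def pvOk (t : String) (graph : List (String × List (String × Int))) (seen : List String) (rest : List (String × Int)) : Prop :=
  ∀ q ∈ rest, 0 < q.2 → q.1 ∈ seen ∨ q.1 = t ∨ q.1 ∈ pvKeys graph

def pvGood (t : String) (graph : List (String × List (String × Int))) (seen : List String) : Prop :=
  ∀ p ∈ graph, pvOk t graph seen p.2

-- number of graph keys not yet seen
def pvU (graph : List (String × List (String × Int))) (seen : List String) : Nat :=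
  ((pvKeys graph).dedup.filter (fun x => !seen.contains x)).length

theorem pvOk_mono {t : String} {graph : List (String × List (String × Int))} {s s' : List String}
    (hss : ∀ x ∈ s, x ∈ s') {rest : List (String × Int)} (h : pvOk t graph s rest) :
    pvOk t graph s' rest := by
  intro q hq hv
  rcases h q hq hv with h1 | h1 | h1
  · exact Or.inl (hss _ h1)
  · exact Or.inr (Or.inl h1)
  · exact Or.inr (Or.inr h1)

theorem pvGood_mono {t : String} {graph : List (String × List (String × Int))} {s s' : List String}
    (hss : ∀ x ∈ s, x ∈ s') (h : pvGood t graph s) : pvGood t graph s' :=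
  fun p hp => pvOk_mono hss (h p hp)

theorem pvU_anti {graph : List (String × List (String × Int))} {s s' : List String}
    (hss : ∀ x ∈ s, x ∈ s') : pvU graph s' ≤ pvU graph s := by
  apply List.Sublist.length_le
  apply List.monotone_filter_right
  intro a ha
  simp only [Bool.not_eq_eq_eq_not, Bool.not_true, List.contains_eq_mem, decide_eq_false_iff_not] at *
  exact fun hm => ha (hss _ hm)

theorem pv_filter_lt {x : String} {p q : String → Bool} :
    ∀ (l : List String), x ∈ l → p x = false → q x = true → (∀ y, p y = true → q y = true) →
      (l.filter p).length < (l.filter q).length := by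
  intro l
  induction l with
  | nil => intro h; simp at h
  | cons a l ih =>
    intro hx hp hq hpq
    have hmono : (l.filter p).length ≤ (l.filter q).length :=
      List.Sublist.length_le (List.monotone_filter_right l hpq)
    rcases List.mem_cons.mp hx with rfl | hx
    · rw [List.filter_cons, List.filter_cons, hp, hq]
      simp only [Bool.false_eq_true, if_false, if_true, List.length_cons]
      omega
    · rw [List.filter_cons, List.filter_cons]
      have hbase := ih hx hp hq hpq
      cases hpa : p a with
      | false =>
        cases hqa : q a <;>
          simp only [List.length_cons, Bool.false_eq_true, if_false, if_true] <;> omega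
      | true =>
        rw [hpq a hpa]
        simp only [List.length_cons, if_true]
        omega

theorem pvU_lt {graph : List (String × List (String × Int))} {s : List String} {x : String}
    (hk : x ∈ pvKeys graph) (hx : x ∉ s) : pvU graph (s ++ [x]) < pvU graph s := by
  apply pv_filter_lt ((pvKeys graph).dedup) (List.mem_dedup.mpr hk)
  · simp
  · simp [hx]
  · intro y
    simp only [Bool.not_eq_eq_eq_not, Bool.not_true, List.contains_eq_mem, decide_eq_false_iff_not]
    intro h hm
    exact h (by simp [hm])


-- lookup facts
theorem pv_lookup_mem {β : Type} (l : List (String × β)) (k : String) (v : β)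
    (h : List.lookup k l = some v) : (k, v) ∈ l := by
  induction l with
  | nil => simp [List.lookup] at h
  | cons p rest ih =>
    rw [List.lookup] at h
    cases hk : (k == p.1) with
    | true =>
      rw [hk] at h
      have hv : p.2 = v := by injection h
      have hkp : k = p.1 := eq_of_beq hk
      have : (k, v) = p := by rw [hkp, ← hv]
      rw [this]; exact List.mem_cons_self ..
    | false =>
      rw [hk] at h
      exact List.mem_cons_of_mem _ (ih h)

theorem pv_lookup_isSome {β : Type} (l : List (String × β)) (k : String)
    (h : k ∈ l.map Prod.fst) : ∃ v, List.lookup k l = some v := by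
  induction l with
  | nil => simp at h
  | cons p rest ih =>
    rw [List.lookup]
    cases hk : (k == p.1) with
    | true => exact ⟨p.2, rfl⟩
    | false =>
      simp only [List.map_cons, List.mem_cons] at h
      rcases h with h | h
      · rw [h] at hk; simp at hk
      · exact ih h

-- seen only grows (as an append)
theorem pv_mono (t : String) (graph : List (String × List (String × Int))) :
    ∀ f : Nat,
      (∀ curr seen path r s', dfsGo t graph f curr seen path = some (r, s') →
        ∃ ext, s' = seen ++ ext) ∧
      (∀ rest seen path r s', tryGo t graph f rest seen path = some (r, s') →
        ∃ ext, s' = seen ++ ext) := by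
  intro f
  induction f using Nat.strong_induction_on with
  | _ f IHf =>
    have hdfs : ∀ curr seen path r s', dfsGo t graph f curr seen path = some (r, s') →
        ∃ ext, s' = seen ++ ext := by
      intro curr seen path r s' h
      match f with
      | 0 => rw [dfsGo] at h; exact absurd h (by simp)
      | f1 + 1 =>
        rw [dfsGo] at h
        by_cases ht : curr = t
        · rw [if_pos ht] at h
          injection h with h; injection h with _ h2
          exact ⟨[], by simp [h2]⟩
        · rw [if_neg ht] at h
          cases hl : List.lookup curr graph with
          | none => rw [hl] at h; exact absurd h (by simp)
          | some adj =>
            rw [hl] at h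
            obtain ⟨ext, hext⟩ := (IHf f1 (by omega)).2 adj _ path r s' h
            rw [PySem.Set.add] at hext
            by_cases hm : curr ∈ seen
            · exact ⟨ext, by simpa [hm] using hext⟩
            · exact ⟨curr :: ext, by simpa [hm] using hext⟩
    refine ⟨hdfs, ?_⟩
    intro rest
    induction rest with
    | nil =>
      intro seen path r s' h
      rw [tryGo] at h
      injection h with h; injection h with _ h2
      exact ⟨[], by simp [h2]⟩
    | cons kv rest IHr =>
      obtain ⟨k, v⟩ := kv
      intro seen path r s' h
      rw [tryGo] at h
      by_cases hc : seen.contains k = false ∧ 0 < v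
      · rw [if_pos hc] at h
        cases hd : dfsGo t graph f k seen (min path.1 v, path.2 ++ [k]) with
        | none => rw [hd] at h; exact absurd h (by simp)
        | some pr =>
          obtain ⟨rc, s1⟩ := pr
          rw [hd] at h
          cases rc with
          | some p =>
            injection h with h; injection h with _ h2
            obtain ⟨ext, hext⟩ := hdfs k seen _ _ s1 hd
            exact ⟨ext, by rw [← h2]; exact hext⟩
          | none =>
            obtain ⟨ext1, hext1⟩ := hdfs k seen _ _ s1 hd
            obtain ⟨ext2, hext2⟩ := IHr s1 path r s' h
            exact ⟨ext1 ++ ext2, by rw [hext2, hext1, List.append_assoc]⟩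
      · rw [if_neg hc] at h
        exact IHr seen path r s' h

-- under the goodness condition, the new seen elements are distinct graph keys
theorem pv_ext (t : String) (graph : List (String × List (String × Int))) :
    ∀ f : Nat,
      (∀ curr seen path r s', dfsGo t graph f curr seen path = some (r, s') →
        pvGood t graph seen → (curr ∈ seen ∨ curr = t ∨ curr ∈ pvKeys graph) →
        ∃ ext, s' = seen ++ ext ∧ ext.Nodup ∧ ∀ x ∈ ext, x ∉ seen ∧ x ∈ pvKeys graph) ∧
      (∀ rest seen path r s', tryGo t graph f rest seen path = some (r, s') →
        pvGood t graph seen → pvOk t graph seen rest →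
        ∃ ext, s' = seen ++ ext ∧ ext.Nodup ∧ ∀ x ∈ ext, x ∉ seen ∧ x ∈ pvKeys graph) := by
  intro f
  induction f using Nat.strong_induction_on with
  | _ f IHf =>
    have hdfs : ∀ curr seen path r s', dfsGo t graph f curr seen path = some (r, s') →
        pvGood t graph seen → (curr ∈ seen ∨ curr = t ∨ curr ∈ pvKeys graph) →
        ∃ ext, s' = seen ++ ext ∧ ext.Nodup ∧ ∀ x ∈ ext, x ∉ seen ∧ x ∈ pvKeys graph := by
      intro curr seen path r s' h hg hcurr
      match f with
      | 0 => rw [dfsGo] at h; exact absurd h (by simp)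
      | f1 + 1 =>
        rw [dfsGo] at h
        by_cases ht : curr = t
        · rw [if_pos ht] at h
          injection h with h; injection h with _ h2
          exact ⟨[], by simp [h2]⟩
        · rw [if_neg ht] at h
          cases hl : List.lookup curr graph with
          | none => rw [hl] at h; exact absurd h (by simp)
          | some adj =>
            rw [hl] at h
            have hok : pvOk t graph seen adj := hg _ (pv_lookup_mem graph curr adj hl)
            by_cases hm : curr ∈ seen
            · have hadd : PySem.Set.add seen curr = seen := by
                rw [PySem.Set.add, if_pos (by simpa using hm)]
              rw [hadd] at h
              exact (IHf f1 (by omega)).2 adj seen path r s' h hg hok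
            · have hkcurr : curr ∈ pvKeys graph := by
                rcases hcurr with h1 | h1 | h1
                · exact absurd h1 hm
                · exact absurd h1 ht
                · exact h1
              have hadd : PySem.Set.add seen curr = seen ++ [curr] := by
                rw [PySem.Set.add, if_neg (by simpa using hm)]
              rw [hadd] at h
              have hsub : ∀ x ∈ seen, x ∈ seen ++ [curr] := fun x hx => by simp [hx]
              obtain ⟨ext1, he1, hn1, hp1⟩ :=
                (IHf f1 (by omega)).2 adj (seen ++ [curr]) path r s'
                  h (pvGood_mono hsub hg) (pvOk_mono hsub hok)
              refine ⟨curr :: ext1, ?_, ?_, ?_⟩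
              · rw [he1, List.append_assoc]; rfl
              · refine List.nodup_cons.mpr ⟨?_, hn1⟩
                intro hc
                exact (hp1 curr hc).1 (by simp)
              · intro x hx
                rcases List.mem_cons.mp hx with rfl | hx
                · exact ⟨hm, hkcurr⟩
                · have := hp1 x hx
                  refine ⟨fun hxs => this.1 (by simp [hxs]), this.2⟩
    refine ⟨hdfs, ?_⟩
    intro rest
    induction rest with
    | nil =>
      intro seen path r s' h hg hok
      rw [tryGo] at h
      injection h with h; injection h with _ h2
      exact ⟨[], by simp [h2]⟩
    | cons kv rest IHr =>
      obtain ⟨k, v⟩ := kv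
      intro seen path r s' h hg hok
      rw [tryGo] at h
      by_cases hc : seen.contains k = false ∧ 0 < v
      · rw [if_pos hc] at h
        have hkk : k ∈ seen ∨ k = t ∨ k ∈ pvKeys graph := hok (k, v) (by simp) hc.2
        cases hd : dfsGo t graph f k seen (min path.1 v, path.2 ++ [k]) with
        | none => rw [hd] at h; exact absurd h (by simp)
        | some pr =>
          obtain ⟨rc, s1⟩ := pr
          rw [hd] at h
          obtain ⟨ext1, he1, hn1, hp1⟩ := hdfs k seen _ _ s1 hd hg hkk
          cases rc with
          | some p =>
            injection h with h; injection h with _ h2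
            exact ⟨ext1, by rw [← h2]; exact he1, hn1, hp1⟩
          | none =>
            have hsub : ∀ x ∈ seen, x ∈ s1 := fun x hx => by rw [he1]; simp [hx]
            obtain ⟨ext2, he2, hn2, hp2⟩ :=
              IHr s1 path r s' h (pvGood_mono hsub hg)
                (pvOk_mono hsub (fun q hq => hok q (by simp [hq])))
            refine ⟨ext1 ++ ext2, ?_, ?_, ?_⟩
            · rw [he2, he1, List.append_assoc]
            · refine List.Nodup.append hn1 hn2 ?_
              intro a ha1 ha2
              exact (hp2 a ha2).1 (by rw [he1]; simp [ha1])
            · intro x hx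
              rcases List.mem_append.mp hx with hx | hx
              · exact hp1 x hx
              · have := hp2 x hx
                refine ⟨fun hxs => this.1 (by rw [he1]; simp [hxs]), this.2⟩
      · rw [if_neg hc] at h
        exact IHr seen path r s' h hg (fun q hq => hok q (by simp [hq]))

-- fuel sufficiency: pvU seen + 1 fuel never runs out
theorem pv_suff (t : String) (graph : List (String × List (String × Int))) :
    ∀ f : Nat,
      (∀ curr seen path, pvGood t graph seen →
        (curr = t ∨ (curr ∉ seen ∧ curr ∈ pvKeys graph)) →
        pvU graph seen + 1 ≤ f → dfsGo t graph f curr seen path ≠ none) ∧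
      (∀ rest seen path, pvGood t graph seen → pvOk t graph seen rest →
        pvU graph seen + 1 ≤ f → tryGo t graph f rest seen path ≠ none) := by
  intro f
  induction f using Nat.strong_induction_on with
  | _ f IHf =>
    have hdfs : ∀ curr seen path, pvGood t graph seen →
        (curr = t ∨ (curr ∉ seen ∧ curr ∈ pvKeys graph)) →
        pvU graph seen + 1 ≤ f → dfsGo t graph f curr seen path ≠ none := by
      intro curr seen path hg hcurr hf
      match f with
      | 0 => omega
      | f1 + 1 =>
        rw [dfsGo]
        by_cases ht : curr = t
        · rw [if_pos ht]; simp
        · rw [if_neg ht]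
          rcases hcurr with h1 | ⟨hns, hkk⟩
          · exact absurd h1 ht
          obtain ⟨adj, hl⟩ := pv_lookup_isSome graph curr hkk
          rw [hl]
          have hok : pvOk t graph seen adj := hg _ (pv_lookup_mem graph curr adj hl)
          have hadd : PySem.Set.add seen curr = seen ++ [curr] := by
            rw [PySem.Set.add, if_neg (by simpa using hns)]
          rw [hadd]
          have hsub : ∀ x ∈ seen, x ∈ seen ++ [curr] := fun x hx => by simp [hx]
          apply (IHf f1 (by omega)).2 adj (seen ++ [curr]) path
            (pvGood_mono hsub hg) (pvOk_mono hsub hok)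
          have := pvU_lt hkk hns
          omega
    refine ⟨hdfs, ?_⟩
    intro rest
    induction rest with
    | nil => intro seen path _ _ _; rw [tryGo]; simp
    | cons kv rest IHr =>
      obtain ⟨k, v⟩ := kv
      intro seen path hg hok hf
      rw [tryGo]
      by_cases hc : seen.contains k = false ∧ 0 < v
      · rw [if_pos hc]
        have hkns : k ∉ seen := by
          intro hm
          rw [List.contains_eq_mem, decide_eq_false_iff_not] at hc
          exact hc.1 hm
        have hkk : k = t ∨ (k ∉ seen ∧ k ∈ pvKeys graph) := by
          rcases hok (k, v) (by simp) hc.2 with h1 | h1 | h1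
          · exact absurd h1 hkns
          · exact Or.inl h1
          · exact Or.inr ⟨hkns, h1⟩
        cases hd : dfsGo t graph f k seen (min path.1 v, path.2 ++ [k]) with
        | none => exact absurd hd (hdfs k seen _ hg hkk hf)
        | some pr =>
          obtain ⟨rc, s1⟩ := pr
          cases rc with
          | some p => simp
          | none =>
            obtain ⟨ext, hext⟩ := (pv_mono t graph f).1 k seen _ _ s1 hd
            have hsub : ∀ x ∈ seen, x ∈ s1 := fun x hx => by rw [hext]; simp [hx]
            apply IHr s1 path (pvGood_mono hsub hg)
              (pvOk_mono hsub (fun q hq => hok q (by simp [hq])))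
            have := pvU_anti (graph := graph) hsub
            omega
      · rw [if_neg hc]
        exact IHr seen path hg (fun q hq => hok q (by simp [hq])) hf

-- the simulation: the stack machine run of one frame computes tryGo's answer,
-- consuming exactly 2 fuel per node expansion (= per new seen element)
theorem pv_teq (t : String) (graph : List (String × List (String × Int))) :
    ∀ f rest seen lim pl r s', tryGo t graph f rest seen (lim, pl) = some (r, s') →
      ∀ d m stk, seen.length + d = s'.length →
        runFrameB t graph (m + 2 * d) rest lim stk seen pl =
          (match r with
           | some res => some (some res)
           | none => runB t graph m stk s' pl.dropLast) := by
  intro f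
  induction f using Nat.strong_induction_on with
  | _ f IHf =>
    intro rest
    induction rest with
    | nil =>
      intro seen lim pl r s' h d m stk hd
      rw [tryGo] at h
      injection h with h
      injection h with h1 h2
      subst h1; subst h2
      have hd0 : d = 0 := by omega
      subst hd0
      rw [runFrameB]
      norm_num
    | cons kv rest IHr =>
      obtain ⟨k, v⟩ := kv
      intro seen lim pl r s' h d m stk hd
      rw [tryGo] at h
      rw [runFrameB]
      by_cases hc : seen.contains k = false ∧ 0 < v
      · rw [if_pos hc] at h
        have hnc : ¬((seen.contains k) = true ∨ v ≤ 0) := by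
          rintro (h1 | h1)
          · rw [hc.1] at h1; exact absurd h1 (by simp)
          · have := hc.2; omega
        rw [if_neg hnc]
        cases hdd : dfsGo t graph f k seen (min lim v, pl ++ [k]) with
        | none => rw [hdd] at h; exact absurd h (by simp)
        | some pr =>
          obtain ⟨rc, s1⟩ := pr
          rw [hdd] at h
          match f with
          | 0 => rw [dfsGo] at hdd; exact absurd hdd (by simp)
          | f1 + 1 =>
            rw [dfsGo] at hdd
            by_cases hkt : k = t
            · rw [if_pos hkt] at hdd
              injection hdd with hdd
              injection hdd with hdd1 hdd2
              subst hdd2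
              rw [← hdd1] at h
              injection h with h
              injection h with h1 h2
              subst h1
              rw [if_pos hkt]
            · rw [if_neg hkt] at hdd
              rw [if_neg hkt]
              cases hl : List.lookup k graph with
              | none => rw [hl] at hdd; exact absurd hdd (by simp)
              | some adjK =>
                rw [hl] at hdd
                dsimp only at hdd ⊢
                have hkns : k ∉ seen := by
                  have := hc.1; simp [List.contains_eq_mem] at this; exact this
                have hadd : PySem.Set.add seen k = seen ++ [k] := by
                  rw [PySem.Set.add, if_neg (by simp [hkns])]
                have hmono1 := (pv_mono t graph f1).2 adjK _ _ rc s1 hdd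
                obtain ⟨ext1, hext1⟩ := hmono1
                rw [hadd] at hext1
                have hs1len : s1.length = seen.length + 1 + ext1.length := by
                  rw [hext1]; simp; omega
                cases rc with
                | some p =>
                  injection h with h
                  injection h with h1 h2
                  subst h1; subst h2
                  have hdeq : d = 1 + ext1.length := by omega
                  have hfuel : m + 2 * d = ((m + 1) + 2 * ext1.length) + 1 := by omega
                  rw [hfuel, runB]
                  have := IHf f1 (by omega) adjK (PySem.Set.add seen k) (min lim v)
                    (pl ++ [k]) (some p) s1 hdd ext1.length (m + 1)
                    ((rest, lim) :: stk) (by rw [hadd]; simp; omega)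
                  rw [this]
                | none =>
                  have h' : tryGo t graph (f1 + 1) rest s1 (lim, pl) = some (r, s') := h
                  have hmono2 := (pv_mono t graph (f1 + 1)).2 rest s1 (lim, pl) r s' h'
                  obtain ⟨ext2, hext2⟩ := hmono2
                  have hslen : s'.length = s1.length + ext2.length := by
                    rw [hext2]; simp
                  have hdeq : d = 1 + ext1.length + ext2.length := by omega
                  have hfuel : m + 2 * d = (((m + 2 * ext2.length + 1) + 2 * ext1.length)) + 1 := by omega
                  rw [hfuel, runB]
                  have hstep1 := IHf f1 (by omega) adjK (PySem.Set.add seen k) (min lim v)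
                    (pl ++ [k]) none s1 hdd ext1.length (m + 2 * ext2.length + 1)
                    ((rest, lim) :: stk) (by rw [hadd]; simp; omega)
                  rw [hstep1]
                  rw [List.dropLast_concat, runB]
                  exact IHr s1 lim pl r s' h' ext2.length m stk (by omega)
      · rw [if_neg hc] at h
        have hb : (seen.contains k) = true ∨ v ≤ 0 := by
          cases hcb : seen.contains k with
          | true => exact Or.inl rfl
          | false =>
            right
            by_contra hv
            exact hc ⟨hcb, by omega⟩
        rw [if_pos hb]
        exact IHr seen lim pl r s' h d m stk hd

-- ===== VERDICT (by name: the statement is the Claim_ definition above) =====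
theorem dfs_spec : Claim_equal_dfs := by
  unfold Claim_equal_dfs
  intro curr t graph seen path _hdom hpre
  unfold Spec_dfs
  obtain ⟨lim, pl⟩ := path
  by_cases ht : curr = t
  · have h1 : dfsGo t graph (graph.length + 3) curr seen (lim, pl) =
        some (some (lim, pl), seen) := by
      rw [show graph.length + 3 = (graph.length + 2) + 1 from rfl, dfsGo, if_pos ht]
    rw [dfs, h1, dfs_alt, if_pos ht]
  · rcases hpre with h1 | ⟨hkk, hgood⟩
    · exact absurd h1 ht
    have hgood' : pvGood t graph seen := fun p hp q hq hv => hgood p hp q hq hv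
    obtain ⟨adj, hl⟩ := pv_lookup_isSome graph curr hkk
    have hok : pvOk t graph seen adj := hgood' _ (pv_lookup_mem graph curr adj hl)
    have hsub : ∀ x ∈ seen, x ∈ PySem.Set.add seen curr := by
      intro x hx; rw [PySem.Set.add]; split <;> simp [hx]
    have hgood2 : pvGood t graph (PySem.Set.add seen curr) := pvGood_mono hsub hgood'
    have hok2 : pvOk t graph (PySem.Set.add seen curr) adj := pvOk_mono hsub hok
    have hU : pvU graph (PySem.Set.add seen curr) ≤ graph.length := by
      apply le_trans (List.length_filter_le _ _)
      apply le_trans (List.Sublist.length_le (List.dedup_sublist _))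
      simp [pvKeys]
    have hne := (pv_suff t graph (graph.length + 2)).2 adj (PySem.Set.add seen curr)
      (lim, pl) hgood2 hok2 (by omega)
    cases htry : tryGo t graph (graph.length + 2) adj (PySem.Set.add seen curr) (lim, pl) with
    | none => exact absurd htry hne
    | some pr =>
      obtain ⟨r, s'⟩ := pr
      have h2 : dfsGo t graph (graph.length + 3) curr seen (lim, pl) = some (r, s') := by
        rw [show graph.length + 3 = (graph.length + 2) + 1 from rfl, dfsGo, if_neg ht, hl]
        exact htry
      obtain ⟨ext, hext, hnodup, hprops⟩ := (pv_ext t graph (graph.length + 2)).2 adj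
        (PySem.Set.add seen curr) (lim, pl) r s' htry hgood2 hok2
      have hdlen : ext.length ≤ graph.length := by
        have h3 : ext.toFinset.card = ext.length := List.toFinset_card_of_nodup hnodup
        have h4 : ext.toFinset ⊆ (pvKeys graph).toFinset := by
          intro a ha
          rw [List.mem_toFinset] at ha ⊢
          exact (hprops a ha).2
        have h5 := Finset.card_le_card h4
        have h6 := List.toFinset_card_le (pvKeys graph)
        have h7 : (pvKeys graph).length = graph.length := by simp [pvKeys]
        omega
      have hdd : (PySem.Set.add seen curr).length + ext.length = s'.length := by
        rw [hext]; simp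
      have hrun := pv_teq t graph (graph.length + 2) adj (PySem.Set.add seen curr)
        lim pl r s' htry ext.length (2 * graph.length + 1 - 2 * ext.length) [] hdd
      have hfuel : 2 * graph.length + 1 =
          (2 * graph.length + 1 - 2 * ext.length) + 2 * ext.length := by omega
      have hrunB : runB t graph (2 * graph.length + 2) [(adj, lim)]
          (PySem.Set.add seen curr) pl =
          runFrameB t graph (2 * graph.length + 1) adj lim []
            (PySem.Set.add seen curr) pl := by
        rw [show 2 * graph.length + 2 = (2 * graph.length + 1) + 1 from rfl, runB]
      rw [dfs, h2, dfs_alt, if_neg ht, hl]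
      dsimp only
      rw [hrunB, hfuel, hrun]
      cases r with
      | some res => rfl
      | none => rw [runB]
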